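-- pv_equiv track=rewrite | github.com/ArtemKhomytskyi/retail-customer-segmentation-and-targeted-promotions | utils.py | find_time_slot
-- ===== SOURCE A (Python) =====
-- def find_time_slot(hour):
--     """
--     Map an hour to a time slot.
--     """
--     time_slots = {
--         1: range(6, 9), # "early_morning"
--         2: range(9, 13), # "morning"
--         3: range(13, 18), # "afternoon"
--         4: range(18, 22), # "evening"
--         5: range(22, 24) # "night"
--     }
--     for slot, hour_range in time_slots.items():
--         if hour in hour_range:
--             return slot
--     return 0 # "late_night"
-- ===== SOURCE B (Python) =====
-- _SLOT_TABLE = {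
--     h: slot
--     for slot, (start, stop) in ((1, (6, 9)), (2, (9, 13)), (3, (13, 18)),
--                                 (4, (18, 22)), (5, (22, 24)))
--     for h in range(start, stop)
-- }
--
--
-- def find_time_slot(hour):
--     """
--     Map an hour to a time slot.
--     """
--     return _SLOT_TABLE.get(hour, 0)
-- ===== Notes on version B (the rewrite author's own statement) =====
-- stated objective: idiomatic
-- what changed: Replaces the per-call dict-of-ranges scan with a module-level flat hour->slot table expanded once from the five ranges, so each call is a single dict lookup with no loop.
import Mathlib
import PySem

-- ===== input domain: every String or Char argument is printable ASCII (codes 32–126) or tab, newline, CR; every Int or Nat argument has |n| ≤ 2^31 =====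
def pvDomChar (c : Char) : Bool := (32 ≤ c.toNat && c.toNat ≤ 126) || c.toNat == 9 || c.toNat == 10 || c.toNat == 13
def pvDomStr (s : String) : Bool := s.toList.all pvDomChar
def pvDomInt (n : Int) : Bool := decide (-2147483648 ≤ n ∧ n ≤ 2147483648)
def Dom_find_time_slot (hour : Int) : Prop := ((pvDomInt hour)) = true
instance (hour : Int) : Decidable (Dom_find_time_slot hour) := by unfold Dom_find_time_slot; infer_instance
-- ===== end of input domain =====

-- B replaces A's per-call scan over five (slot, range) buckets by one flat hour→slot table
-- built once from those ranges, looked up with .get(hour, 0) (objective: idiomatic).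

-- ===== PORT A =====
-- the loop 'for slot, hour_range in time_slots.items(): if hour in hour_range: return slot'
def findTimeSlotLoop (hour : Int) : List (Int × Int × Int) → Int
  | [] => 0                                   -- return 0  # "late_night"
  | (slot, lo, hi) :: rest =>
      if lo ≤ hour ∧ hour < hi then slot      -- hour in range(lo, hi)
      else findTimeSlotLoop hour rest

def find_time_slot (hour : Int) : Int :=
  let time_slots : List (Int × Int × Int) :=
    [(1, 6, 9), (2, 9, 13), (3, 13, 18), (4, 18, 22), (5, 22, 24)]
  findTimeSlotLoop hour time_slots

-- ===== PORT B =====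
-- _SLOT_TABLE = {h: slot for slot, (start, stop) in … for h in range(start, stop)}
def slotTable : PySem.Dict Int Int :=
  PySem.Dict.ofList
    (([(1, 6, 9), (2, 9, 13), (3, 13, 18), (4, 18, 22), (5, 22, 24)] :
        List (Int × Int × Int)).flatMap
      (fun p => (PySem.List.pyRange p.2.1 p.2.2 1).map (fun h => (h, p.1))))

def find_time_slot_alt (hour : Int) : Int :=
  slotTable.getD hour 0

-- ===== PRECONDITION & SPEC =====
def Spec_find_time_slot (hour : Int) (out : Int) : Prop := out = find_time_slot_alt hour
instance (hour : Int) (out : Int) : Decidable (Spec_find_time_slot hour out) := by unfold Spec_find_time_slot; infer_instance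

-- ===== CLAIM (what is proved, stated in full; the proofs are below) =====
def Claim_equal_find_time_slot : Prop := ∀ (hour : Int), Dom_find_time_slot hour → Spec_find_time_slot hour (find_time_slot hour)

-- ===== LEMMAS AND PROOFS =====
set_option maxHeartbeats 1000000 in
theorem slotTable_eq :
    slotTable = PySem.Dict.mk
      [(6, 1), (7, 1), (8, 1), (9, 2), (10, 2), (11, 2), (12, 2),
       (13, 3), (14, 3), (15, 3), (16, 3), (17, 3),
       (18, 4), (19, 4), (20, 4), (21, 4), (22, 5), (23, 5)] := by
  simp only [slotTable, PySem.List.pyRange_one]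
  decide

theorem alt_eq_table (hour : Int) :
    find_time_slot_alt hour =
      (PySem.Dict.mk
        [(6, 1), (7, 1), (8, 1), (9, 2), (10, 2), (11, 2), (12, 2),
         (13, 3), (14, 3), (15, 3), (16, 3), (17, 3),
         (18, 4), (19, 4), (20, 4), (21, 4), (22, 5), (23, 5)]).getD hour 0 := by
  rw [find_time_slot_alt, slotTable_eq]

theorem get?_mk_none_of (hour : Int) :
    ∀ (l : List (Int × Int)), (∀ p ∈ l, 6 ≤ p.1 ∧ p.1 < 24) → (hour < 6 ∨ 24 ≤ hour) →
      (PySem.Dict.mk l).get? hour = none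
  | [], _, _ => rfl
  | p :: rest, h, hh => by
      rw [PySem.Dict.get?_mk_cons, if_neg]
      · exact get?_mk_none_of hour rest (fun q hq => h q (List.mem_cons_of_mem _ hq)) hh
      · have hp := h p (List.mem_cons_self)
        simp only [beq_iff_eq]
        omega

theorem find_time_slot_eq_alt (hour : Int) :
    find_time_slot hour = find_time_slot_alt hour := by
  rw [alt_eq_table]
  by_cases h : 6 ≤ hour ∧ hour < 24
  · obtain ⟨h1, h2⟩ := h
    interval_cases hour <;> decide
  · have hB := get?_mk_none_of hour
      [(6, 1), (7, 1), (8, 1), (9, 2), (10, 2), (11, 2), (12, 2),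
       (13, 3), (14, 3), (15, 3), (16, 3), (17, 3),
       (18, 4), (19, 4), (20, 4), (21, 4), (22, 5), (23, 5)]
      (by decide) (by omega)
    rw [PySem.Dict.getD_eq_get?_getD, hB]
    simp only [find_time_slot, findTimeSlotLoop, Option.getD_none]
    split_ifs <;> first | rfl | omega

-- ===== VERDICT (by name: the statement is the Claim_ definition above) =====
theorem find_time_slot_spec : Claim_equal_find_time_slot := by
  intro hour _
  exact find_time_slot_eq_alt hour
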